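-- pv_equiv track=rewrite | github.com/echang26/MOOC | a4.py | autocomplete
-- ===== SOURCE A (Python) =====
-- def autocomplete(prefix, pmap):
--     """Returns the list of all words the complete prefix in pmap
--
--     If there are no words completing prefix in pmap, this function returns the
--     empty list.
--
--     Example: If pmap is the prefix map created from 'short.txt', then
--     autocomplete('th',pmap) returns the list ['the', 'that'].
--     Similarly, autocomplete('x',pmap) returns the empty list []
--
--     Precondition: prefix is a string that is either empty or has only letters.
--     pmap is a prefix map.
--
--     Enforced Preconditions: We enforce the preconditions for prefix, but only
--     enforce that pmap is a dict."""
--     # This function will require recursion combined with a for-loop.  The base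
--     # case is when prefix is not in the prefix map.  Otherwise, you will need
--     # to process all of the values in the list pmap[prefix].
--
--     # Be careful with pmap[prefix]. If prefix is an actual word then '' is in this
--     # list.  If you are not careful with your recursive call, then you will find
--     # yourself in an infinite recursion.
--
--     # NOTE: This function MUST be recurse, and you are not allowed to add any
--     # helper functions to implement this function.
--
--     if prefix not in pmap:
--         return []
--     else:
--         final_words = []
--         for item in pmap[prefix]:
--             new_prefix = prefix + item
--             if item != '':
--                 final_words += autocomplete(new_prefix, pmap)
--             else:
--                 final_words.append(new_prefix)
--     return final_words
-- ===== SOURCE B (Python) =====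
-- def autocomplete(prefix, pmap):
--     """Iterative version: explicit stack of (prefix, is_word) entries instead of recursion."""
--     result = []
--     stack = [(prefix, False)]
--     while stack:
--         p, is_word = stack.pop()
--         if is_word:
--             result.append(p)
--         elif p in pmap:
--             stack.extend((p + item, item == '') for item in reversed(pmap[p]))
--     return result
-- ===== Notes on version B (the rewrite author's own statement) =====
-- stated objective: alternative
-- what changed: Replaces the recursive pre-order DFS with an iterative loop over an explicit stack of (prefix, is_word) entries, pushing each node's children in reverse so the left-to-right pre-order output is preserved.
import Mathlib
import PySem

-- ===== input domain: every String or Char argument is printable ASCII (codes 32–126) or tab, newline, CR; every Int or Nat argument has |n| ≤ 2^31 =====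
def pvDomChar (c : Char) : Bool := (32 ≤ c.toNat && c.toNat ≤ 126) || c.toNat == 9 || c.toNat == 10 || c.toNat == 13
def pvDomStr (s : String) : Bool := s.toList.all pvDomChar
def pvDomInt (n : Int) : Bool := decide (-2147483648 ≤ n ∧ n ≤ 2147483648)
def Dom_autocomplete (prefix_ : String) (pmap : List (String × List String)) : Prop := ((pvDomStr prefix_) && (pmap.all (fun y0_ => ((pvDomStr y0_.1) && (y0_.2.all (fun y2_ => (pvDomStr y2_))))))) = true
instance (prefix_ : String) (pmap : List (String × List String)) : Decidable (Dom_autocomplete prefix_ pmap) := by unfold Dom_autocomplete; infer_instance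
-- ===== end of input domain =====

-- B replaces A's recursive pre-order DFS with an iterative explicit-stack traversal (same output order).

-- ===== PORT A =====
-- Termination helpers (used by both ports' decreasing_by proofs; cited by name there).
def pvKeyBound (d : PySem.Dict String (List String)) : Nat :=
  (d.keys.map String.length).foldr Nat.max 0

def pvValBound (d : PySem.Dict String (List String)) : Nat :=
  (d.values.map List.length).foldr Nat.max 0

-- remaining admissible depth of a prefix (0 once it is longer than every key)
def pvDepth (d : PySem.Dict String (List String)) (p : String) : Nat :=
  pvKeyBound d + 1 - p.length

theorem pv_le_foldr_max {x : Nat} {l : List Nat} (h : x ∈ l) : x ≤ l.foldr Nat.max 0 := by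
  induction l with
  | nil => cases h
  | cons a t ih =>
    rcases List.mem_cons.mp h with rfl | h'
    · exact Nat.le_max_left _ _
    · exact le_trans (ih h') (Nat.le_max_right _ _)

theorem pv_len_le_keyBound (d : PySem.Dict String (List String)) (p : String)
    (items : List String) (h : d.get? p = some items) : p.length ≤ pvKeyBound d := by
  have hk : p ∈ d.keys := by
    by_contra hn
    rw [(PySem.Dict.get?_eq_none_iff_not_mem_keys d p).mpr hn] at h
    cases h
  exact pv_le_foldr_max (List.mem_map_of_mem hk)

theorem pv_items_le_valBound (d : PySem.Dict String (List String)) (p : String)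
    (items : List String) (h : d.get? p = some items) : items.length ≤ pvValBound d := by
  have hv : items ∈ d.values := by
    have := PySem.Dict.mem_items_of_get?_eq_some (d := d) h
    simpa [PySem.Dict.values] using List.mem_map_of_mem (f := (·.2)) this
  exact pv_le_foldr_max (List.mem_map_of_mem hv)

theorem pv_len_pos {s : String} (h : s ≠ "") : 0 < s.length := by
  rw [← String.length_toList]
  have h2 : s.toList ≠ [] := by
    intro hh; apply h
    have := congrArg String.ofList hh
    simpa using this
  exact List.length_pos_iff.mpr h2

mutual
-- A: 'if prefix not in pmap: return []' then the for-loop accumulating final_words.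
def autocompleteGo (d : PySem.Dict String (List String)) (p : String) : List String :=
  match h : d.get? p with
  | none => []
  | some items => autocompleteLoop d p (pv_len_le_keyBound d p items h) items []
termination_by (pvDepth d p, 1, 0)

-- A's for-loop over pmap[prefix]; acc is final_words.
def autocompleteLoop (d : PySem.Dict String (List String)) (p : String)
    (hp : p.length ≤ pvKeyBound d) (items : List String) (acc : List String) : List String :=
  match items with
  | [] => acc
  | it :: rest =>
    if it ≠ "" then autocompleteLoop d p hp rest (acc ++ autocompleteGo d (p ++ it))
    else autocompleteLoop d p hp rest (acc ++ [p ++ it])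
termination_by (pvDepth d p, 0, items.length)
decreasing_by
  all_goals first
  | (apply Prod.Lex.right; apply Prod.Lex.left; omega)
  | (apply Prod.Lex.right; apply Prod.Lex.right; simp)
  | (apply Prod.Lex.left
     have h1 : 0 < it.length := pv_len_pos (by simpa using ‹it ≠ ""›)
     have h2 : (p ++ it).length = p.length + it.length := String.length_append p it
     simp only [pvDepth]
     omega)
end

def autocomplete (prefix_ : String) (pmap : List (String × List String)) : List String :=
  autocompleteGo (PySem.Dict.ofList pmap) prefix_

-- ===== PORT B =====
-- weight of one stack entry: completed words count 1, pending prefixes exponentially in depth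
def pvWeight (d : PySem.Dict String (List String)) (e : String × Bool) : Nat :=
  if e.2 then 1 else (pvValBound d + 2) ^ (pvDepth d e.1)

theorem pv_expand_lt (d : PySem.Dict String (List String)) (p : String)
    (items : List String) (h : d.get? p = some items) :
    ((items.map (fun it => (p ++ it, it == ""))).map (pvWeight d)).sum
      < (pvValBound d + 2) ^ (pvDepth d p) := by
  have hp : p.length ≤ pvKeyBound d := pv_len_le_keyBound d p items h
  have hd : 1 ≤ pvDepth d p := by simp only [pvDepth]; omega
  have hbound : ∀ x ∈ (items.map (fun it => (p ++ it, it == ""))).map (pvWeight d),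
      x ≤ (pvValBound d + 2) ^ (pvDepth d p - 1) := by
    intro x hx
    simp only [List.map_map, List.mem_map, Function.comp] at hx
    obtain ⟨it, _, rfl⟩ := hx
    by_cases hit : it = ""
    · simp [pvWeight, hit]
      exact Nat.one_le_pow _ _ (by omega)
    · have h1 : 0 < it.length := pv_len_pos hit
      have h2 : (p ++ it).length = p.length + it.length := String.length_append p it
      have hdep : pvDepth d (p ++ it) ≤ pvDepth d p - 1 := by
        simp only [pvDepth]; omega
      simp [pvWeight, hit]
      exact Nat.pow_le_pow_right (by omega) hdep
  have hlen : ((items.map (fun it => (p ++ it, it == ""))).map (pvWeight d)).length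
      ≤ pvValBound d := by
    simpa using pv_items_le_valBound d p items h
  calc ((items.map (fun it => (p ++ it, it == ""))).map (pvWeight d)).sum
      ≤ ((items.map (fun it => (p ++ it, it == ""))).map (pvWeight d)).length
          * (pvValBound d + 2) ^ (pvDepth d p - 1) := by
        simpa [smul_eq_mul] using List.sum_le_card_nsmul _ _ hbound
    _ ≤ pvValBound d * (pvValBound d + 2) ^ (pvDepth d p - 1) :=
        Nat.mul_le_mul_right _ hlen
    _ < (pvValBound d + 2) * (pvValBound d + 2) ^ (pvDepth d p - 1) := by
        have : 0 < (pvValBound d + 2) ^ (pvDepth d p - 1) := Nat.pow_pos (by omega)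
        exact Nat.mul_lt_mul_of_lt_of_le (by omega) (le_refl _) this
    _ = (pvValBound d + 2) ^ (pvDepth d p) := by
        rw [← pow_succ']
        congr 1
        omega

-- B: while stack: pop (p, is_word); append p if is_word, else expand pmap[p].
def autocompleteAltGo (d : PySem.Dict String (List String))
    (stack : List (String × Bool)) (acc : List String) : List String :=
  match stack with
  | [] => acc
  | (p, true) :: rest => autocompleteAltGo d rest (acc ++ [p])
  | (p, false) :: rest =>
    match h : d.get? p with
    | none => autocompleteAltGo d rest acc
    | some items =>
        autocompleteAltGo d (items.map (fun it => (p ++ it, it == "")) ++ rest) acc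
termination_by (stack.map (pvWeight d)).sum
decreasing_by
  · simp [pvWeight]
  · simp [pvWeight]
  · have hlt := pv_expand_lt d p items h
    simp only [List.map_map] at hlt
    simp [pvWeight, List.sum_append]
    omega

def autocomplete_alt (prefix_ : String) (pmap : List (String × List String)) : List String :=
  autocompleteAltGo (PySem.Dict.ofList pmap) [(prefix_, false)] []

-- ===== PRECONDITION & SPEC =====
def Spec_autocomplete (prefix_ : String) (pmap : List (String × List String)) (out : List String) : Prop := out = autocomplete_alt prefix_ pmap
instance (prefix_ : String) (pmap : List (String × List String)) (out : List String) : Decidable (Spec_autocomplete prefix_ pmap out) := by unfold Spec_autocomplete; infer_instance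

-- ===== CLAIM (what is proved, stated in full; the proofs are below) =====
def Claim_equal_autocomplete : Prop := ∀ (prefix_ : String) (pmap : List (String × List String)), Dom_autocomplete prefix_ pmap → Spec_autocomplete prefix_ pmap (autocomplete prefix_ pmap)

-- ===== LEMMAS AND PROOFS =====

theorem pv_altGo_nil (d : PySem.Dict String (List String)) (acc : List String) :
    autocompleteAltGo d [] acc = acc := by
  rw [autocompleteAltGo]

theorem pv_loop_acc (d : PySem.Dict String (List String)) (p : String)
    (hp : p.length ≤ pvKeyBound d) (items : List String) (acc : List String) :
    autocompleteLoop d p hp items acc = acc ++ autocompleteLoop d p hp items [] := by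
  induction items generalizing acc with
  | nil => rw [autocompleteLoop, autocompleteLoop]; simp
  | cons it rest ih =>
    rw [autocompleteLoop]
    conv_rhs => rw [autocompleteLoop]
    by_cases hit : it = ""
    · simp only [hit, ne_eq, not_true_eq_false, if_false]
      rw [ih, ih (acc := [] ++ _)]
      simp
    · simp only [ne_eq, hit, not_false_eq_true, if_true]
      rw [ih, ih (acc := [] ++ _)]
      simp

theorem pv_goA_none (d : PySem.Dict String (List String)) (p : String)
    (h : d.get? p = none) : autocompleteGo d p = [] := by
  rw [autocompleteGo]
  split <;> simp_all

theorem pv_goA_some (d : PySem.Dict String (List String)) (p : String)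
    (items : List String) (h : d.get? p = some items) (hp : p.length ≤ pvKeyBound d) :
    autocompleteGo d p = autocompleteLoop d p hp items [] := by
  rw [autocompleteGo]
  split <;> simp_all

theorem pv_altGo_true (d : PySem.Dict String (List String)) (p : String)
    (rest : List (String × Bool)) (acc : List String) :
    autocompleteAltGo d ((p, true) :: rest) acc = autocompleteAltGo d rest (acc ++ [p]) := by
  rw [autocompleteAltGo]

theorem pv_altGo_false_none (d : PySem.Dict String (List String)) (p : String)
    (rest : List (String × Bool)) (acc : List String) (h : d.get? p = none) :
    autocompleteAltGo d ((p, false) :: rest) acc = autocompleteAltGo d rest acc := by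
  rw [autocompleteAltGo]
  split <;> simp_all

theorem pv_altGo_false_some (d : PySem.Dict String (List String)) (p : String)
    (items : List String) (rest : List (String × Bool)) (acc : List String)
    (h : d.get? p = some items) :
    autocompleteAltGo d ((p, false) :: rest) acc
      = autocompleteAltGo d (items.map (fun it => (p ++ it, it == "")) ++ rest) acc := by
  rw [autocompleteAltGo]
  split <;> simp_all

theorem pv_main (d : PySem.Dict String (List String)) :
    ∀ (n : Nat) (p : String), pvDepth d p ≤ n →
      ∀ (rest : List (String × Bool)) (acc : List String),
        autocompleteAltGo d ((p, false) :: rest) acc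
          = autocompleteAltGo d rest (acc ++ autocompleteGo d p) := by
  intro n
  induction n with
  | zero =>
    intro p hdep rest acc
    have hnone : d.get? p = none := by
      cases hg : d.get? p with
      | none => rfl
      | some items =>
        have := pv_len_le_keyBound d p items hg
        simp only [pvDepth] at hdep
        omega
    rw [pv_altGo_false_none d p rest acc hnone, pv_goA_none d p hnone]
    simp
  | succ n ih =>
    intro p hdep rest acc
    cases hg : d.get? p with
    | none =>
      rw [pv_altGo_false_none d p rest acc hg, pv_goA_none d p hg]
      simp
    | some items =>
      have hp : p.length ≤ pvKeyBound d := pv_len_le_keyBound d p items hg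
      have hchild : ∀ it : String, it ≠ "" → pvDepth d (p ++ it) ≤ n := by
        intro it hit
        have h1 : 0 < it.length := pv_len_pos hit
        have h2 : (p ++ it).length = p.length + it.length := String.length_append p it
        simp only [pvDepth] at hdep ⊢
        omega
      have inner : ∀ (items' : List String) (rest' : List (String × Bool)) (acc' : List String),
          (∀ it ∈ items', it ≠ "" → pvDepth d (p ++ it) ≤ n) →
          autocompleteAltGo d (items'.map (fun it => (p ++ it, it == "")) ++ rest') acc'
            = autocompleteAltGo d rest' (autocompleteLoop d p hp items' acc') := by
        intro items'
        induction items' with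
        | nil => intro rest' acc' _; rw [autocompleteLoop]; simp
        | cons it tl ihl =>
          intro rest' acc' hall
          by_cases hit : it = ""
          · subst hit
            simp only [List.map_cons, List.cons_append, beq_self_eq_true]
            rw [pv_altGo_true, autocompleteLoop]
            simp only [ne_eq, not_true_eq_false, if_false]
            exact ihl _ _ (fun x hx => hall x (List.mem_cons_of_mem _ hx))
          · have hbe : (it == "") = false := by simp [hit]
            simp only [List.map_cons, List.cons_append, hbe]
            rw [ih (p ++ it) (hchild it hit)]
            rw [autocompleteLoop]
            simp only [ne_eq, hit, not_false_eq_true, if_true]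
            exact ihl _ _ (fun x hx => hall x (List.mem_cons_of_mem _ hx))
      rw [pv_altGo_false_some d p items rest acc hg,
          inner items rest acc (fun it _ => hchild it),
          pv_loop_acc, pv_goA_some d p items hg hp]

-- ===== VERDICT (by name: the statement is the Claim_ definition above) =====
theorem autocomplete_spec : Claim_equal_autocomplete := by
  intro prefix_ pmap _
  unfold Spec_autocomplete autocomplete autocomplete_alt
  rw [pv_main (PySem.Dict.ofList pmap) (pvDepth (PySem.Dict.ofList pmap) prefix_) prefix_ le_rfl]
  rw [pv_altGo_nil]
  simp
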